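-- pv_equiv track=rewrite | github.com/djacobow/conflib | conflib.py | __getValSize
-- ===== SOURCE A (Python) =====
-- def __getValSize(v):
--     m = 0x80000000
--     i = 0;
--     while i<32:
--         if v & m:
--             break
--         m = m >> 1
--         i += 1
--     bits = 32 - i
--     if bits == 0:
--         return 0
--     elif bits == 1:
--         return 1
--     elif bits == 2:
--         return 2
--     elif bits <= 4:
--         return 3
--     elif bits <= 8:
--         return 4
--     elif bits <= 16:
--         return 5
--     return 6
-- ===== SOURCE B (Python) =====
-- def __getValSize(v):
--     # closed form: highest set bit of the low 32 bits via bit_length, then threshold cascade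
--     bits = (v & 0xFFFFFFFF).bit_length()
--     if bits == 0:
--         return 0
--     elif bits == 1:
--         return 1
--     elif bits == 2:
--         return 2
--     elif bits <= 4:
--         return 3
--     elif bits <= 8:
--         return 4
--     elif bits <= 16:
--         return 5
--     return 6
-- ===== Notes on version B (the rewrite author's own statement) =====
-- stated objective: idiomatic
-- what changed: Replaced the fixed-length MSB-scanning while loop with the closed-form bit_length() of the masked low word, keeping the same size-code cascade.
import Mathlib
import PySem

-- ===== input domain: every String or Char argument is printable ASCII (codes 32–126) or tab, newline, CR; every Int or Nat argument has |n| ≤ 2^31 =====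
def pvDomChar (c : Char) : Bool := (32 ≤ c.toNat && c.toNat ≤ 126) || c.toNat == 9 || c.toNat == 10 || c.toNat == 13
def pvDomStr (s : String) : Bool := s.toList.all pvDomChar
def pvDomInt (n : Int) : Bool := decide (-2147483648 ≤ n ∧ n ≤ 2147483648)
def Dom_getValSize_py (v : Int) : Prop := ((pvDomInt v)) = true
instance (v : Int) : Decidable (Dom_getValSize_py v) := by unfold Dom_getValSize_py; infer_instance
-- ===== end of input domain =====

-- B replaces A's 32-step MSB-scanning while loop with the closed-form bit_length of the
-- masked value ((v & 0xFFFFFFFF).bit_length()), keeping the same size-code cascade (idiomatic).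

-- ===== PORT A =====
-- Python's while loop, one fuel step per iteration (fuel 33 ≥ the 32 possible iterations;
-- the `i < 32` test is Python's own loop guard).  `v & m` truthiness = ≠ 0; `m >> 1` = `>>> 1`.
def getValSizeLoop (v m i : Int) : Nat → Int
  | 0 => i
  | fuel+1 =>
    if i < 32 then
      if PySem.Int.band v m ≠ 0 then i
      else getValSizeLoop v (m >>> (1:Nat)) (i + 1) fuel
    else i

def getValSize_py (v : Int) : Int :=
  let i := getValSizeLoop v 0x80000000 0 33
  let bits := 32 - i
  if bits = 0 then 0
  else if bits = 1 then 1
  else if bits = 2 then 2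
  else if bits ≤ 4 then 3
  else if bits ≤ 8 then 4
  else if bits ≤ 16 then 5
  else 6

-- ===== PORT B =====
def getValSize_py_alt (v : Int) : Int :=
  let bits : Int := (PySem.Int.bitLength (PySem.Int.band v 0xFFFFFFFF) : Int)
  if bits = 0 then 0
  else if bits = 1 then 1
  else if bits = 2 then 2
  else if bits ≤ 4 then 3
  else if bits ≤ 8 then 4
  else if bits ≤ 16 then 5
  else 6

-- ===== PRECONDITION & SPEC =====
def Spec_getValSize_py (v : Int) (out : Int) : Prop := out = getValSize_py_alt v
instance (v : Int) (out : Int) : Decidable (Spec_getValSize_py v out) := by unfold Spec_getValSize_py; infer_instance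

-- ===== CLAIM (what is proved, stated in full; the proofs are below) =====
def Claim_equal_getValSize_py : Prop := ∀ (v : Int), Dom_getValSize_py v → Spec_getValSize_py v (getValSize_py v)

-- ===== LEMMAS AND PROOFS =====

-- n &&& 2^j, knowing n < 2^(j+1): nonzero exactly when bit j is set, i.e. 2^j ≤ n.
lemma and_top_pow (n j : Nat) (h : n < 2^(j+1)) :
    n &&& 2^j = if 2^j ≤ n then 2^j else 0 := by
  rw [Nat.and_two_pow, Nat.testBit_eq_decide_div_mod_eq]
  have hp : (0:ℕ) < 2^j := by positivity
  by_cases hge : 2^j ≤ n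
  · have hq1 : 1 ≤ n / 2^j := (Nat.one_le_div_iff hp).mpr hge
    have hq2 : n / 2^j < 2 := (Nat.div_lt_iff_lt_mul hp).mpr (by rw [pow_succ] at h; omega)
    have hq : n / 2^j = 1 := by omega
    simp [hq, hge]
  · have hlt : n < 2^j := by omega
    have hq : n / 2^j = 0 := Nat.div_eq_of_lt hlt
    simp [hq, Nat.not_le.mpr hlt]

-- bitLength of a Nat cast, sandwiched between consecutive powers of two.
lemma bitLength_sandwich (n j : Nat) (h1 : 2^j ≤ n) (h2 : n < 2^(j+1)) :
    PySem.Int.bitLength (n:Int) = j + 1 := by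
  have hne : (n:Int) ≠ 0 := by
    have : 0 < n := lt_of_lt_of_le (by positivity) h1
    exact_mod_cast this.ne'
  have hA := PySem.Int.lt_two_pow_bitLength (n:Int)
  have hB := PySem.Int.two_pow_bitLength_le (n:Int) hne
  rw [Int.natAbs_natCast] at hA hB
  set L := PySem.Int.bitLength (n:Int) with hL
  have h3 : j < L := (Nat.pow_lt_pow_iff_right (by norm_num)).mp (lt_of_le_of_lt h1 hA)
  have h4 : L - 1 < j + 1 := (Nat.pow_lt_pow_iff_right (by norm_num)).mp (lt_of_le_of_lt hB h2)
  omega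

lemma bitLength_zero' : PySem.Int.bitLength ((0:Nat):Int) = 0 := by decide

-- Loop characterisation on nonnegative inputs: scanning from mask 2^j with counter 31-j,
-- for n below 2^(j+1), yields 32 - bit_length n.
lemma loop_nn (j : Nat) (n : Nat) (hj : j ≤ 31) (hn : n < 2^(j+1)) :
    getValSizeLoop (n:Int) ((2^j : Nat) : Int) (31 - (j:Int)) (j+2)
      = 32 - (PySem.Int.bitLength (n:Int) : Int) := by
  induction j with
  | zero =>
    simp only [getValSizeLoop]
    rw [if_pos (by omega)]
    have h01 : n = 0 ∨ n = 1 := by omega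
    rcases h01 with h0 | h1
    · subst h0
      rw [if_neg (by decide), bitLength_zero']
      norm_num [getValSizeLoop]
    · subst h1
      rw [if_pos (by decide)]
      have : PySem.Int.bitLength ((1:Nat):Int) = 1 := by decide
      rw [this]; norm_num
  | succ j ih =>
    simp only [getValSizeLoop]
    rw [if_pos (by omega)]
    have hand : (n &&& 2^(j+1)) = if 2^(j+1) ≤ n then 2^(j+1) else 0 := and_top_pow n (j+1) hn
    by_cases hge : 2^(j+1) ≤ n
    · rw [if_pos ?_]
      · have hb := bitLength_sandwich n (j+1) hge hn
        rw [hb]; push_cast; ring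
      · rw [PySem.Int.band_natCast, hand, if_pos hge]
        exact_mod_cast (Nat.pos_of_ne_zero (by positivity)).ne'
    · rw [if_neg ?_]
      · have hm : (((2^(j+1) : Nat)) : Int) >>> (1:Nat) = ((2^j : Nat) : Int) := by
          rw [← Int.natCast_shiftRight]
          congr 1
          rw [Nat.shiftRight_eq_div_pow, pow_one, pow_succ]
          omega
        have hi : (31 : Int) - ((j:Nat)+1 : Nat) + 1 = 31 - (j:Int) := by push_cast; ring
        rw [hm, hi]
        exact ih (by omega) (by rw [Nat.not_le] at hge; exact hge)
      · rw [PySem.Int.band_natCast, hand, if_neg hge]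
        simp

-- PySem.Int.band of a negative left argument with a Nat cast, made explicit.
lemma band_neg_nat (v : Int) (hv : v < 0) (n : Nat) :
    PySem.Int.band v (n:Int) = ((n - (n &&& (-v-1).toNat) : Nat) : Int) := by
  unfold PySem.Int.band
  rw [if_neg (by omega), if_pos (by positivity)]
  simp

-- The loop result equals 32 - bit_length(v & 0xFFFFFFFF) on the whole domain.
lemma loop_eq (v : Int) (h1 : -2^31 ≤ v) (h2 : v ≤ 2^31) :
    getValSizeLoop v 0x80000000 0 33
      = 32 - (PySem.Int.bitLength (PySem.Int.band v 0xFFFFFFFF) : Int) := by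
  by_cases hpos : 0 ≤ v
  · obtain ⟨n, rfl⟩ : ∃ n : Nat, v = (n:Int) := ⟨v.toNat, (Int.toNat_of_nonneg hpos).symm⟩
    have hn : n < 2^32 := by
      have : (n:Int) ≤ 2^31 := h2
      have : n ≤ 2^31 := by exact_mod_cast this
      omega
    have hmask : PySem.Int.band ((n:Nat):Int) 0xFFFFFFFF = ((n:Nat):Int) := by
      have : (0xFFFFFFFF : Int) = (((2^32 - 1 : Nat)) : Int) := by norm_num
      rw [this, PySem.Int.band_natCast, Nat.and_two_pow_sub_one_eq_mod, Nat.mod_eq_of_lt hn]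
    rw [hmask]
    have h80 : (0x80000000 : Int) = ((2^31 : Nat) : Int) := by norm_num
    have h0 : (0 : Int) = 31 - ((31:Nat) : Int) := by norm_num
    rw [h80, h0]
    exact loop_nn 31 n le_rfl (by omega)
  · have hneg : v < 0 := by omega
    -- negative v: bit 31 of the low 32 bits is set, loop breaks immediately, bit_length is 32
    set k := (-v-1).toNat with hk
    have hk31 : k < 2^31 := by omega
    have hband31 : PySem.Int.band v 0x80000000 = ((2^31 : Nat) : Int) := by
      have : (0x80000000 : Int) = (((2^31 : Nat)) : Int) := by norm_num
      rw [this, band_neg_nat v hneg]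
      rw [Nat.and_comm, Nat.and_two_pow, Nat.testBit_lt_two_pow hk31]
      norm_num
    have hbandF : PySem.Int.band v 0xFFFFFFFF = (((2^32 - 1 - k : Nat)) : Int) := by
      have : (0xFFFFFFFF : Int) = (((2^32 - 1 : Nat)) : Int) := by norm_num
      rw [this, band_neg_nat v hneg]
      rw [Nat.and_comm, Nat.and_two_pow_sub_one_eq_mod, Nat.mod_eq_of_lt (by omega)]
    rw [hbandF, bitLength_sandwich (2^32 - 1 - k) 31 (by omega) (by omega)]
    simp only [getValSizeLoop]
    rw [if_pos (by omega), if_pos (by rw [hband31]; exact_mod_cast (by positivity : (0:Nat) < 2^31).ne')]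
    norm_num

-- ===== VERDICT (by name: the statement is the Claim_ definition above) =====
theorem getValSize_py_spec : Claim_equal_getValSize_py := by
  intro v hd
  have hb : -2^31 ≤ v ∧ v ≤ 2^31 := by
    simpa [Dom_getValSize_py, pvDomInt] using hd
  unfold Spec_getValSize_py getValSize_py getValSize_py_alt
  simp only [loop_eq v hb.1 hb.2]
  have : (32:Int) - (32 - (PySem.Int.bitLength (PySem.Int.band v 0xFFFFFFFF) : Int))
       = (PySem.Int.bitLength (PySem.Int.band v 0xFFFFFFFF) : Int) := by ring
  simp only [this]
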